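-- pv_equiv track=rewrite | github.com/cyprienhm/advent-of-code | 2025/day_06/s.py | part2
-- ===== SOURCE A (Python) =====
-- from functools import reduce
--
-- def multiply(col):
--     return reduce(lambda x, y: x * y, col, 1)
--
-- def add(col):
--     return sum(col)
--
-- def part2(data: list[str]):
--     ops = [c for c in data[-1].split(" ") if c != ""][::-1]
--
--     target_cols = len([c for c in data[0].split(" ") if c != ""])
--
--     nums = data[:-1]
--     num_rows = len(nums)
--     num_cols = len(nums[0])
--     parsed_nums = []
--     currently_filled = []
--     for i in range(num_cols - 1, -1, -1):
--         cur = ""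
--         for row in nums:
--             cur += row[i]
--
--         cur = cur.strip()
--         if len(cur) == 0:
--             parsed_nums.append(currently_filled[:])
--             currently_filled.clear()
--             continue
--         else:
--             currently_filled.append(int(cur.strip()))
--     parsed_nums.append(currently_filled[:])
--
--     op_to_func = {"+": add, "*": multiply}
--
--     post_ops = [op_to_func[op](col) for op, col in zip(ops, parsed_nums)]
--     return sum(post_ops)
-- ===== SOURCE B (Python) =====
-- def part2(data: list[str]):
--     # One fused right-to-left pass: no parsed group lists are built; the reversed
--     # operator list is consumed as a worklist and each group is reduced online
--     # into a single running accumulator, flushed at every blank column.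
--     ops_left = [c for c in data[-1].split(" ") if c != ""][::-1]
--     nums = data[:-1]
--     acc = 0 if (not ops_left or ops_left[0] == "+") else 1
--     total = 0
--     i = len(nums[0]) - 1
--     while i >= 0:
--         col = "".join(row[i] for row in nums).strip()
--         if col == "":
--             if ops_left:
--                 total += acc
--                 ops_left = ops_left[1:]
--             acc = 0 if (not ops_left or ops_left[0] == "+") else 1
--         else:
--             v = int(col)
--             if ops_left:
--                 acc = acc + v if ops_left[0] == "+" else acc * v
--         i -= 1
--     return total + (acc if ops_left else 0)
-- ===== Notes on version B (the rewrite author's own statement) =====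
-- stated objective: alternative
-- what changed: A's two-phase design (build all parsed column groups, then zip them with the reversed ops, apply a function dictionary per group and sum the resulting list) is replaced by one fused online pass: no parsed_nums/post_ops lists exist, the reversed op list is consumed as a worklist, and each group is reduced into a single running accumulator (seeded 0 or 1 by the pending op) that is flushed into the total at each blank column.
import Mathlib
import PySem

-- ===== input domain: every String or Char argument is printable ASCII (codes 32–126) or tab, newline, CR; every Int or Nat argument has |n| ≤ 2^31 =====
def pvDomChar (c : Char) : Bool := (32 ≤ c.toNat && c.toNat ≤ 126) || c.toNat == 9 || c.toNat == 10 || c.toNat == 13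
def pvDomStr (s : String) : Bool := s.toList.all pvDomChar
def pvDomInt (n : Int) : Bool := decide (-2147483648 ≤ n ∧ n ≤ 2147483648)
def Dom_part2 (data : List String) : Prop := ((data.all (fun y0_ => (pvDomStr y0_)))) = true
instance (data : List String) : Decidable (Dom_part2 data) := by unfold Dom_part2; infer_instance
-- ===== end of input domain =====

-- B replaces A's two-phase build-groups-then-zip/dispatch design by one fused online pass
-- that consumes the reversed op list as a worklist and keeps a single running accumulator.

-- ===== PORT A =====
def pvMultiply (col : List Int) : Int := col.foldl (fun x y => x * y) 1

def pvAdd (col : List Int) : Int := col.foldl (fun x y => x + y) 0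

def part2 (data : List String) : Int :=
  match PySem.List.pyGet? data (-1) with
  | none => 0  -- IndexError on data[-1]; excluded by Pre_part2
  | some lastRow =>
    let ops := (((PySem.Str.split? lastRow " ").getD []).filter (fun c => c ≠ "")).reverse
    let _targetCols :=
      (((PySem.Str.split? ((PySem.List.pyGet? data 0).getD "") " ").getD []).filter
        (fun c => c ≠ "")).length
    let nums := PySem.List.slice data none (some (-1))
    match PySem.List.pyGet? nums 0 with
    | none => 0  -- IndexError on nums[0]; excluded by Pre_part2
    | some row0 =>
      let numCols := PySem.Str.len row0
      let st := (PySem.List.pyRange (numCols - 1) (-1) (-1)).foldl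
        (fun (st : List (List Int) × List Int) i =>
          -- cur = ""; for row in nums: cur += row[i]  (IndexError junk excluded by Pre_part2)
          let cur : List Char :=
            nums.foldl (fun acc row => acc ++ ((PySem.Str.pyGet? row i).elim [] (fun c => [c]))) []
          let cur := PySem.Chars.strip cur
          if PySem.Chars.len cur = 0 then
            (st.1 ++ [st.2], [])
          else
            (st.1, st.2 ++ [(PySem.Int.ofChars? (PySem.Chars.strip cur)).getD 0]))  -- ValueError junk excluded by Pre_part2
        ([], [])
      let parsedNums := st.1 ++ [st.2]
      let postOps := (ops.zip parsedNums).map (fun p =>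
        if p.1 = "+" then pvAdd p.2
        else if p.1 = "*" then pvMultiply p.2
        else 0)  -- KeyError in op_to_func[op]; excluded by Pre_part2
      postOps.foldl (fun x y => x + y) 0

-- ===== PORT B =====
-- acc seed: 0 if no pending op or pending op is "+", else 1
def pvInit (opsLeft : List String) : Int :=
  match opsLeft with
  | [] => 0
  | op :: _ => if op = "+" then 0 else 1

-- the while loop of B: state (ops_left, acc, total), one step per column index
def pvGoB (nums : List String) : List Int → List String → Int → Int → Int
  | [], opsLeft, acc, total => total + (if opsLeft.isEmpty then 0 else acc)
  | i :: rest, opsLeft, acc, total =>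
    let col := PySem.Chars.strip
      (PySem.Chars.join [] (nums.map (fun row => (PySem.Str.pyGet? row i).elim [] (fun c => [c]))))
    if col = [] then
      match opsLeft with
      | [] => pvGoB nums rest [] (pvInit []) total
      | _ :: restOps => pvGoB nums rest restOps (pvInit restOps) (total + acc)
    else
      let v := (PySem.Int.ofChars? col).getD 0  -- ValueError junk excluded by Pre_part2
      let acc' :=
        match opsLeft with
        | [] => acc
        | op :: _ => if op = "+" then acc + v else acc * v
      pvGoB nums rest opsLeft acc' total

def part2_alt (data : List String) : Int :=
  match PySem.List.pyGet? data (-1) with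
  | none => 0  -- IndexError on data[-1]; excluded by Pre_part2
  | some lastRow =>
    let ops := (((PySem.Str.split? lastRow " ").getD []).filter (fun c => c ≠ "")).reverse
    let nums := PySem.List.slice data none (some (-1))
    match PySem.List.pyGet? nums 0 with
    | none => 0  -- IndexError on nums[0]; excluded by Pre_part2
    | some row0 =>
      pvGoB nums (PySem.List.pyRange (PySem.Str.len row0 - 1) (-1) (-1)) ops (pvInit ops) 0

-- ===== PRECONDITION & SPEC =====
-- helpers for Pre_ (shared with no port)
def pvColumn (nums : List String) (i : Int) : List Char :=
  PySem.Chars.strip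
    (nums.foldl (fun acc row => acc ++ ((PySem.Str.pyGet? row i).elim [] (fun c => [c]))) [])

def pvOps (data : List String) : List String :=
  (((PySem.Str.split? (data.getLastD "") " ").getD []).filter (fun c => c ≠ "")).reverse

-- Pre_ admits exactly the inputs where the Python A returns: at least two lines, every
-- number row at least as long as the first, every non-blank column an int literal, and
-- every op that is actually paired with a group one of "+"/"*" (otherwise A raises
-- IndexError / ValueError / KeyError respectively).
def Pre_part2 (data : List String) : Prop :=
  2 ≤ data.length ∧
  (∀ row ∈ data.dropLast, PySem.Str.len data.dropLast.headI ≤ PySem.Str.len row) ∧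
  (∀ i ∈ PySem.List.pyRange (PySem.Str.len data.dropLast.headI - 1) (-1) (-1),
      pvColumn data.dropLast i = [] ∨ (PySem.Int.ofChars? (pvColumn data.dropLast i)).isSome) ∧
  (∀ op ∈ (pvOps data).take
      (1 + (PySem.List.pyRange (PySem.Str.len data.dropLast.headI - 1) (-1) (-1)).countP
            (fun i => pvColumn data.dropLast i = [])),
      op = "+" ∨ op = "*")

instance (data : List String) : Decidable (Pre_part2 data) := by unfold Pre_part2; infer_instance

def pvWitness_part2 : List String := ["12 345", "  6   7", " +  * "]

def Spec_part2 (data : List String) (out : Int) : Prop := out = part2_alt data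
instance (data : List String) (out : Int) : Decidable (Spec_part2 data out) := by unfold Spec_part2; infer_instance

-- ===== CLAIM (what is proved, stated in full; the proofs are below) =====
def Claim_equal_part2 : Prop := ∀ (data : List String), Dom_part2 data → Pre_part2 data → Spec_part2 data (part2 data)

-- ===== LEMMAS AND PROOFS =====

-- proof-only helpers
def pvStepA (st : List (List Int) × List Int) (col : List Char) : List (List Int) × List Int :=
  if PySem.Chars.len col = 0 then (st.1 ++ [st.2], [])
  else (st.1, st.2 ++ [(PySem.Int.ofChars? (PySem.Chars.strip col)).getD 0])

-- split a column list into parsed groups (B's grouping, read off the scan order)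
def pvSplit : List (List Char) → List (List Int)
  | [] => [[]]
  | c :: cs =>
    if c = [] then [] :: pvSplit cs
    else
      match pvSplit cs with
      | [] => [[(PySem.Int.ofChars? c).getD 0]]
      | g :: gs => ((PySem.Int.ofChars? c).getD 0 :: g) :: gs

def pvConsHead (pre : List Int) : List (List Int) → List (List Int)
  | [] => [pre]
  | g :: gs => (pre ++ g) :: gs

def pvApply (p : String × List Int) : Int :=
  if p.1 = "+" then pvAdd p.2 else if p.1 = "*" then pvMultiply p.2 else 0

def pvApplyB (p : String × List Int) : Int :=
  if p.1 = "+" then pvAdd p.2 else pvMultiply p.2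

def pvAccOf (opsLeft : List String) (pre : List Int) : Int :=
  match opsLeft with
  | [] => 0
  | op :: _ => if op = "+" then pvAdd pre else pvMultiply pre

-- the fused pass over an already-extracted column list
def pvGoCols : List (List Char) → List String → Int → Int → Int
  | [], opsLeft, acc, total => total + (if opsLeft.isEmpty then 0 else acc)
  | c :: cs, opsLeft, acc, total =>
    if c = [] then
      match opsLeft with
      | [] => pvGoCols cs [] (pvInit []) total
      | _ :: restOps => pvGoCols cs restOps (pvInit restOps) (total + acc)
    else
      let v := (PySem.Int.ofChars? c).getD 0
      let acc' :=
        match opsLeft with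
        | [] => acc
        | op :: _ => if op = "+" then acc + v else acc * v
      pvGoCols cs opsLeft acc' total

def pvR (f : String × List Int → Int) (ops : List String) (gs : List (List Int)) : Int :=
  ((ops.zip gs).map f).foldl (fun x y => x + y) 0

lemma pv_lstrip_of_stripped (w : List Char)
    (hne : List.dropWhile PySem.Chars.isspace w = w) (z : List Char) (hz : z <+: w) :
    List.dropWhile PySem.Chars.isspace z = z := by
  cases z with
  | nil => simp
  | cons c t =>
    have hcw : w ≠ [] := by
      intro h
      rw [h] at hz
      simpa using hz.length_le
    have hc : c = w.head hcw := by
      obtain ⟨s, hs⟩ := hz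
      cases w with
      | nil => simp at hcw
      | cons a b =>
        have h3 : c = a := by
          have := congrArg List.headI hs
          simpa using this
        simpa using h3
    have hhead : PySem.Chars.isspace (w.head hcw) = false := by
      have h2 : List.dropWhile PySem.Chars.isspace w ≠ [] := by rw [hne]; exact hcw
      have := List.head_dropWhile_not PySem.Chars.isspace h2
      simpa [hne] using this
    rw [List.dropWhile_cons]
    simp [hc, hhead]

lemma pv_strip_strip (x : List Char) :
    PySem.Chars.strip (PySem.Chars.strip x) = PySem.Chars.strip x := by
  simp only [PySem.Chars.strip, PySem.Chars.lstrip, PySem.Chars.rstrip]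
  set w := List.dropWhile PySem.Chars.isspace x with hw
  have hwdrop : List.dropWhile PySem.Chars.isspace w = w := List.dropWhile_idempotent _ _
  set y := (List.dropWhile PySem.Chars.isspace w.reverse).reverse with hy
  have hypref : y <+: w := by
    rw [hy]
    simpa using List.reverse_prefix.mpr (List.dropWhile_suffix (p := PySem.Chars.isspace) (l := w.reverse))
  have hly : List.dropWhile PySem.Chars.isspace y = y := pv_lstrip_of_stripped w hwdrop y hypref
  rw [hly, hy]
  simp [List.dropWhile_idempotent]

lemma pv_intercalate_nil (l : List (List Char)) : ([] : List Char).intercalate l = l.flatten := by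
  induction l with
  | nil => simp [List.intercalate]
  | cons x l ih => cases l <;> simp_all [List.intercalate]

lemma pv_join_eq_foldl (nums : List String) (f : String → List Char) :
    PySem.Chars.join [] (nums.map f) = nums.foldl (fun acc row => acc ++ f row) [] := by
  have h1 : PySem.Chars.join [] (nums.map f) = (nums.map f).flatten := by
    simp [PySem.Chars.join]
    exact pv_intercalate_nil _
  rw [h1]
  rw [PySem.List.foldl_append_eq_flatMap]
  simp [List.flatMap]

lemma pv_foldl_add_shift (l : List Int) (a : Int) :
    l.foldl (fun x y => x + y) a = a + l.foldl (fun x y => x + y) 0 := by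
  have h1 := PySem.List.foldl_add (g := fun x : Int => x) (a := a) (l := l)
  have h2 := PySem.List.foldl_add (g := fun x : Int => x) (a := 0) (l := l)
  simp only [List.map_id_fun', id] at h1 h2
  rw [h1, h2, zero_add]

lemma pv_mem_zip_fst_take {α β : Type} (l1 : List α) (l2 : List β) (p : α × β)
    (h : p ∈ l1.zip l2) : p.1 ∈ l1.take l2.length := by
  induction l1 generalizing l2 with
  | nil => simp at h
  | cons a l1 ih =>
    cases l2 with
    | nil => simp at h
    | cons b l2 =>
      simp only [List.zip_cons_cons, List.mem_cons] at h
      rcases h with h | h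
      · simp [h]
      · simp only [List.length_cons, List.take_succ_cons, List.mem_cons]
        exact Or.inr (ih l2 h)

lemma pv_pyGet_neg_one {α : Type} [Inhabited α] (xs : List α) (h : xs ≠ []) :
    PySem.List.pyGet? xs (-1) = some (xs.getLastD default) := by
  have hl : 1 ≤ xs.length := List.length_pos_iff.mpr h
  simp [PySem.List.pyGet?, PySem.List.pyIdx?, hl]
  rw [← List.getLast?_eq_getElem?]
  cases hx : xs.getLast? with
  | none => exact absurd (List.getLast?_eq_none_iff.mp hx) h
  | some v => simp

lemma pv_pyGet_zero {α : Type} [Inhabited α] (xs : List α) (h : xs ≠ []) :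
    PySem.List.pyGet? xs 0 = some xs.headI := by
  cases xs with
  | nil => simp at h
  | cons a l => simp [PySem.List.pyGet?, PySem.List.pyIdx?]

lemma pv_split_ne_nil (cs : List (List Char)) : pvSplit cs ≠ [] := by
  cases cs with
  | nil => simp [pvSplit]
  | cons c cs =>
    unfold pvSplit
    split
    · simp
    · cases h : pvSplit cs <;> simp

lemma pv_split_length (cs : List (List Char)) :
    (pvSplit cs).length = 1 + cs.countP (fun c => decide (c = [])) := by
  induction cs with
  | nil => simp [pvSplit]
  | cons c cs ih =>
    unfold pvSplit
    by_cases hc : c = []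
    · simp [hc, ih]; omega
    · rw [if_neg hc]
      cases h : pvSplit cs with
      | nil => exact absurd h (pv_split_ne_nil cs)
      | cons g gs =>
        rw [h] at ih
        simp [hc] at ih ⊢
        omega

-- A-side: the interleaved fold builds exactly pvConsHead cur (pvSplit cs)
lemma pv_foldA_split (cs : List (List Char)) (parsed : List (List Int)) (cur : List Int)
    (h : ∀ col ∈ cs, PySem.Chars.strip col = col) :
    (cs.foldl pvStepA (parsed, cur)).1 ++ [(cs.foldl pvStepA (parsed, cur)).2]
      = parsed ++ pvConsHead cur (pvSplit cs) := by
  induction cs generalizing parsed cur with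
  | nil => simp [pvSplit, pvConsHead]
  | cons c cs ih =>
    have hc : PySem.Chars.strip c = c := h c (by simp)
    have hrest : ∀ col ∈ cs, PySem.Chars.strip col = col := fun col hm => h col (by simp [hm])
    simp only [List.foldl_cons]
    by_cases hce : c = []
    · have hA : pvStepA (parsed, cur) c = (parsed ++ [cur], []) := by
        simp [pvStepA, hce]
      rw [hA, ih _ _ hrest]
      cases hsp : pvSplit cs with
      | nil => exact absurd hsp (pv_split_ne_nil cs)
      | cons g gs => simp [pvSplit, hce, hsp, pvConsHead]
    · have hlen : ¬ PySem.Chars.len c = 0 := by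
        simpa [PySem.Chars.len, List.length_eq_zero_iff] using hce
      have hA : pvStepA (parsed, cur) c
          = (parsed, cur ++ [(PySem.Int.ofChars? c).getD 0]) := by
        unfold pvStepA
        rw [if_neg hlen, hc]
      rw [hA, ih _ _ hrest]
      cases hsp : pvSplit cs with
      | nil => exact absurd hsp (pv_split_ne_nil cs)
      | cons g gs => simp [pvSplit, hce, hsp, pvConsHead]

lemma pv_R_cons (f : String × List Int → Int) (op : String) (ops : List String)
    (g : List Int) (gs : List (List Int)) :
    pvR f (op :: ops) (g :: gs) = f (op, g) + pvR f ops gs := by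
  unfold pvR
  simp only [List.zip_cons_cons, List.map_cons, List.foldl_cons, zero_add]
  exact pv_foldl_add_shift _ _

-- B-side: the fused loop computes the staged sum pvR pvApplyB
lemma pv_split_blank (cs : List (List Char)) :
    pvSplit ([] :: cs) = [] :: pvSplit cs := by
  simp [pvSplit]

lemma pv_split_nonblank (c : List Char) (cs : List (List Char)) (g : List Int)
    (gs : List (List Int)) (hce : c ≠ []) (hsp : pvSplit cs = g :: gs) :
    pvSplit (c :: cs) = ((PySem.Int.ofChars? c).getD 0 :: g) :: gs := by
  unfold pvSplit
  rw [if_neg hce, hsp]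

-- B-side: the fused loop computes the staged sum pvR pvApplyB
lemma pv_goCols_fused (cs : List (List Char)) (opsLeft : List String)
    (pre : List Int) (total : Int) :
    pvGoCols cs opsLeft (pvAccOf opsLeft pre) total
      = total + pvR pvApplyB opsLeft (pvConsHead pre (pvSplit cs)) := by
  induction cs generalizing opsLeft pre total with
  | nil =>
    cases opsLeft with
    | nil => simp [pvGoCols, pvSplit, pvConsHead, pvR]
    | cons op rest =>
      simp [pvGoCols, pvSplit, pvConsHead, pvAccOf, pvR, pvApplyB, pvAdd, pvMultiply]
  | cons c cs ih =>
    obtain ⟨g, gs, hsp⟩ : ∃ g gs, pvSplit cs = g :: gs := by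
      cases h : pvSplit cs with
      | nil => exact absurd h (pv_split_ne_nil cs)
      | cons g gs => exact ⟨g, gs, rfl⟩
    by_cases hce : c = []
    · subst hce
      rw [pv_split_blank]
      cases opsLeft with
      | nil =>
        have hstep : pvGoCols ([] :: cs) ([] : List String) (pvAccOf [] pre) total
            = pvGoCols cs [] (pvInit []) total := by
          simp [pvGoCols]
        rw [hstep]
        have h2 : pvInit ([] : List String) = pvAccOf [] ([] : List Int) := by
          simp [pvInit, pvAccOf]
        rw [h2, ih [] [] total]
        simp [pvR]
      | cons op rest =>
        have hstep : pvGoCols ([] :: cs) (op :: rest) (pvAccOf (op :: rest) pre) total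
            = pvGoCols cs rest (pvInit rest) (total + pvAccOf (op :: rest) pre) := by
          simp [pvGoCols]
        have h2 : pvInit rest = pvAccOf rest [] := by
          cases rest <;> simp [pvInit, pvAccOf, pvAdd, pvMultiply]
        rw [hstep, h2, ih rest [] _]
        rw [hsp]
        show total + pvAccOf (op :: rest) pre + pvR pvApplyB rest (pvConsHead [] (g :: gs))
          = total + pvR pvApplyB (op :: rest) (pvConsHead pre ([] :: g :: gs))
        simp only [pvConsHead, List.nil_append, List.append_nil]
        rw [pv_R_cons]
        have : pvApplyB (op, pre) = pvAccOf (op :: rest) pre := by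
          simp [pvApplyB, pvAccOf]
        rw [this]
        ring
    · rw [pv_split_nonblank c cs g gs hce hsp]
      set v := (PySem.Int.ofChars? c).getD 0 with hvv
      cases opsLeft with
      | nil =>
        have hstep : pvGoCols (c :: cs) ([] : List String) (pvAccOf [] pre) total
            = pvGoCols cs [] (pvAccOf [] pre) total := by
          simp [pvGoCols, hce]
        rw [hstep]
        have h2 : pvAccOf ([] : List String) pre = pvAccOf [] (pre ++ [v]) := by
          simp [pvAccOf]
        rw [h2, ih [] (pre ++ [v]) total]
        simp [pvR]
      | cons op rest =>
        have hstep : pvGoCols (c :: cs) (op :: rest) (pvAccOf (op :: rest) pre) total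
            = pvGoCols cs (op :: rest)
                (if op = "+" then pvAccOf (op :: rest) pre + v else pvAccOf (op :: rest) pre * v)
                total := by
          simp [pvGoCols, hce, hvv]
        have hacc : (if op = "+" then pvAccOf (op :: rest) pre + v
              else pvAccOf (op :: rest) pre * v)
            = pvAccOf (op :: rest) (pre ++ [v]) := by
          by_cases hop : op = "+"
          · simp [pvAccOf, hop, pvAdd]
          · simp [pvAccOf, hop, pvMultiply]
        rw [hstep, hacc, ih (op :: rest) (pre ++ [v]) total]
        rw [hsp]
        simp only [pvConsHead, List.append_assoc, List.cons_append, List.nil_append]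

-- transfer pvGoB (which re-extracts columns from nums) to pvGoCols over the column list
lemma pv_goB_eq_goCols (nums : List String) (idxs : List Int)
    (opsLeft : List String) (acc total : Int) :
    pvGoB nums idxs opsLeft acc total
      = pvGoCols (idxs.map (pvColumn nums)) opsLeft acc total := by
  induction idxs generalizing opsLeft acc total with
  | nil => rfl
  | cons i rest ih =>
    have hcol : PySem.Chars.strip
        (PySem.Chars.join [] (nums.map (fun row => (PySem.Str.pyGet? row i).elim [] (fun c => [c]))))
        = pvColumn nums i := by
      unfold pvColumn
      rw [pv_join_eq_foldl]
    simp only [pvGoB, pvGoCols, List.map_cons, hcol]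
    by_cases hce : pvColumn nums i = []
    · simp only [hce]
      cases opsLeft <;> simp [ih]
    · simp only [if_neg hce]
      cases opsLeft <;> simp [ih]

-- ===== VERDICT (by name: the statement is the Claim_ definition above) =====
theorem part2_spec : Claim_equal_part2 := by
  unfold Claim_equal_part2
  intro data _hdom hpre
  obtain ⟨hlen, _hrows, _hparse, hops⟩ := hpre
  unfold Spec_part2
  have hne : data ≠ [] := by
    intro h; rw [h] at hlen; simp at hlen
  have h1 : PySem.List.pyGet? data (-1) = some (data.getLastD "") := by
    simpa using pv_pyGet_neg_one data hne
  have hnums : PySem.List.slice data none (some (-1)) = data.dropLast :=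
    PySem.List.slice_to_neg_one data
  have hne2 : data.dropLast ≠ [] := by
    have hld : data.dropLast.length = data.length - 1 := List.length_dropLast
    intro h
    rw [h] at hld
    simp at hld
    omega
  have h2 : PySem.List.pyGet? data.dropLast 0 = some data.dropLast.headI := by
    simpa using pv_pyGet_zero data.dropLast hne2
  rw [part2.eq_def, part2_alt.eq_def, h1, hnums]
  dsimp only
  rw [h2]
  dsimp only
  set N := data.dropLast with hN
  set r := PySem.List.pyRange (PySem.Str.len N.headI - 1) (-1) (-1) with hr
  set opsl := (List.filter (fun c => decide (c ≠ "")) ((PySem.Str.split? (data.getLastD "") " ").getD [])).reverse with hopsl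
  show List.foldl (fun x y => x + y) 0
      ((opsl.zip ((r.foldl (fun st i => pvStepA st (pvColumn N i)) ([], [])).1
        ++ [(r.foldl (fun st i => pvStepA st (pvColumn N i)) ([], [])).2])).map pvApply)
    = pvGoB N r opsl (pvInit opsl) 0
  set cs := r.map (pvColumn N) with hcsdef
  have hstrip : ∀ col ∈ cs, PySem.Chars.strip col = col := by
    intro col hcol
    rw [hcsdef] at hcol
    obtain ⟨i, _, hi⟩ := List.mem_map.mp hcol
    rw [← hi]
    unfold pvColumn
    exact pv_strip_strip _
  have hAfold : r.foldl (fun st i => pvStepA st (pvColumn N i)) ([], ([] : List Int))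
      = cs.foldl pvStepA ([], []) := by
    rw [hcsdef, List.foldl_map]
  rw [hAfold]
  have hP : (cs.foldl pvStepA ([], [])).1 ++ [(cs.foldl pvStepA ([], [])).2] = pvSplit cs := by
    have := pv_foldA_split cs [] [] hstrip
    cases hsp : pvSplit cs with
    | nil => exact absurd hsp (pv_split_ne_nil cs)
    | cons g gs => simpa [hsp, pvConsHead] using this
  rw [hP]
  -- B side
  rw [pv_goB_eq_goCols, ← hcsdef]
  have hinit : pvInit opsl = pvAccOf opsl [] := by
    cases opsl <;> simp [pvInit, pvAccOf, pvAdd, pvMultiply]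
  rw [hinit, pv_goCols_fused cs opsl [] 0]
  have hch : pvConsHead [] (pvSplit cs) = pvSplit cs := by
    cases hsp : pvSplit cs with
    | nil => exact absurd hsp (pv_split_ne_nil cs)
    | cons g gs => simp [pvConsHead]
  rw [hch, zero_add]
  -- both sides are now sums over zip opsl (pvSplit cs); map functions agree via hops
  have hgood : ∀ p ∈ opsl.zip (pvSplit cs), p.1 = "+" ∨ p.1 = "*" := by
    intro p hp
    have hmem := pv_mem_zip_fst_take opsl (pvSplit cs) p hp
    have hPlen : (pvSplit cs).length = 1 + r.countP (fun i => decide (pvColumn N i = [])) := by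
      rw [pv_split_length, hcsdef, List.countP_map]
      rfl
    apply hops
    rw [← hPlen]
    unfold pvOps
    exact hmem
  unfold pvR
  have hmapeq : (opsl.zip (pvSplit cs)).map pvApply = (opsl.zip (pvSplit cs)).map pvApplyB := by
    refine List.map_congr_left (fun p hp => ?_)
    rcases hgood p hp with h | h <;> simp [pvApply, pvApplyB, h]
  rw [hmapeq]
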